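-- pv_equiv track=rewrite | github.com/VITA-Group/Symbolic-Learning-To-Optimize | torch-implementation/stage023_resnet.py | comma_paren
-- ===== SOURCE A (Python) =====
-- def comma_paren(expr, loc):
--     # given string expr, return the position of mathing ')' and the ','
--     # assume expr has fun(A,B) structure after loc
--     substr = expr[loc:]
--     comma_ = 0
--     cnt_left = 0
--     seen = False
--     for i, s in enumerate(expr[loc:]):
--         if s==',':
--             comma_ = i
--         elif s=='(':
--             cnt_left += 1
--             seen = True
--         elif s==')':
--             cnt_left -= 1
--
--         if seen and cnt_left==0:
--             paren_ = i
--             break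
--     return loc+comma_ , loc+paren_
-- ===== SOURCE B (Python) =====
-- def comma_paren(expr, loc):
--     # two separate passes: locate the matching ')' first, then search
--     # backwards (with early exit) for the last ',' before it
--     substr = expr[loc:]
--     depth = 0
--     seen = False
--     p = None
--     for i, ch in enumerate(substr):
--         if ch == '(':
--             depth += 1
--             seen = True
--         elif ch == ')':
--             depth -= 1
--         if seen and depth == 0:
--             p = i
--             break
--     comma_ = 0
--     for j in range(p - 1, -1, -1):
--         if substr[j] == ',':
--             comma_ = j
--             break
--     return loc + comma_, loc + p
-- ===== Notes on version B (the rewrite author's own statement) =====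
-- stated objective: alternative
-- what changed: A tracks the last comma and the paren depth in one combined pass; B first runs a depth-only scan to find the matching ')' at index p, then searches backwards with early exit for the last ',' in substr[:p] (default 0), so the comma bookkeeping disappears from the main loop.
import Mathlib
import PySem

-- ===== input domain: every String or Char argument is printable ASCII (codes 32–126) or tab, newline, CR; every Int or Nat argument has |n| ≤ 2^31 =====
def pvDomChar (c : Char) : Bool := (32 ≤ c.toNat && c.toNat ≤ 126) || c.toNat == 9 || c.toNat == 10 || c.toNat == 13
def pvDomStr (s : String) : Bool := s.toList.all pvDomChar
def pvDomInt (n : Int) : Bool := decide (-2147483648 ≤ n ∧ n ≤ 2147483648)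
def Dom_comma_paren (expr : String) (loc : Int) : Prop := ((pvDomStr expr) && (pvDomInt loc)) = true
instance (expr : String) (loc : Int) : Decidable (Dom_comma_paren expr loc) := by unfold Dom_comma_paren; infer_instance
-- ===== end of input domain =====

-- B splits A's single combined pass into a depth-only scan for the matching ')'
-- plus a backward early-exit search for the last ',' before it (alternative decomposition).

-- ===== PORT A =====
-- A's single loop: index i, last-comma accumulator, paren counter, seen flag;
-- returns none when the loop falls through (Python raises UnboundLocalError there).
def aLoop : List Char → Nat → Int → Int → Bool → Option (Int × Nat)
  | [], _, _, _, _ => none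
  | s :: rest, i, comma, cnt, seen =>
    let comma' := if s = ',' then (i : Int) else comma
    let cnt'   := if s = '(' then cnt + 1 else if s = ')' then cnt - 1 else cnt
    let seen'  := if s = '(' then true else seen
    if seen' = true ∧ cnt' = 0 then some (comma', i)
    else aLoop rest (i + 1) comma' cnt' seen'

def comma_paren (expr : String) (loc : Int) : Int × Int :=
  let substr := PySem.List.slice expr.toList (some loc) none
  match aLoop substr 0 0 0 false with
  | some (c, p) => (loc + c, loc + (p : Int))
  | none => (loc, loc)  -- Python raises UnboundLocalError here; excluded by Pre_

-- ===== PORT B =====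
-- depth-only scan: p = None before the loop, some i at the break
def bFind : List Char → Nat → Int → Bool → Option Nat
  | [], _, _, _ => none
  | ch :: rest, p, depth, seen =>
    let depth' := if ch = '(' then depth + 1 else if ch = ')' then depth - 1 else depth
    let seen'  := if ch = '(' then true else seen
    if seen' = true ∧ depth' = 0 then some p
    else bFind rest (p + 1) depth' seen'

-- 'for j in range(j0, -1, -1): if substr[j] == ',': comma_ = j; break'  (comma_ starts at 0)
def rscanComma (l : List Char) : Nat → Int
  | 0 => if l[0]? = some ',' then 0 else 0
  | j + 1 => if l[j + 1]? = some ',' then ((j : Int) + 1) else rscanComma l j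

def comma_paren_alt (expr : String) (loc : Int) : Int × Int :=
  let substr := PySem.List.slice expr.toList (some loc) none
  let p : Nat :=
    match bFind substr 0 0 false with
    | some p => p
    | none => 0  -- p is still None: Python raises TypeError on range(p - 1, ...); excluded by Pre_
  let comma : Int := if p = 0 then 0 else rscanComma substr (p - 1)
  (loc + comma, loc + (p : Int))

-- ===== PRECONDITION & SPEC =====
-- Pre_ = exactly the inputs on which A's loop breaks (otherwise Python A raises
-- UnboundLocalError): some prefix of expr[loc:] contains a '(' and has balanced parens.
def Pre_comma_paren (expr : String) (loc : Int) : Prop :=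
  ∃ i < (PySem.List.slice expr.toList (some loc) none).length,
    '(' ∈ (PySem.List.slice expr.toList (some loc) none).take (i + 1) ∧
    ((PySem.List.slice expr.toList (some loc) none).take (i + 1)).count '(' =
      ((PySem.List.slice expr.toList (some loc) none).take (i + 1)).count ')'
instance (expr : String) (loc : Int) : Decidable (Pre_comma_paren expr loc) := by
  unfold Pre_comma_paren; infer_instance

def pvWitness_comma_paren : String × Int := ("f(a,b)", 0)

def Spec_comma_paren (expr : String) (loc : Int) (out : Int × Int) : Prop := out = comma_paren_alt expr loc
instance (expr : String) (loc : Int) (out : Int × Int) : Decidable (Spec_comma_paren expr loc out) := by unfold Spec_comma_paren; infer_instance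

-- ===== CLAIM (what is proved, stated in full; the proofs are below) =====
def Claim_equal_comma_paren : Prop := ∀ (expr : String) (loc : Int), Dom_comma_paren expr loc → Pre_comma_paren expr loc → Spec_comma_paren expr loc (comma_paren expr loc)

-- ===== LEMMAS AND PROOFS =====

-- last-comma accumulator of A's loop, isolated: index i, accumulator c
def lastC : List Char → Nat → Int → Int
  | [], _, c => c
  | x :: xs, i, c => lastC xs (i + 1) (if x = ',' then (i : Int) else c)

theorem bFind_ge : ∀ (l : List Char) (i : Nat) (cnt : Int) (seen : Bool) (p : Nat),
    bFind l i cnt seen = some p → i ≤ p := by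
  intro l
  induction l with
  | nil => intro i cnt seen p h; simp [bFind] at h
  | cons x rest ih =>
    intro i cnt seen p h
    simp only [bFind] at h
    by_cases hb : ((if x = '(' then true else seen) = true ∧ (if x = '(' then cnt + 1 else if x = ')' then cnt - 1 else cnt) = 0)
    · rw [if_pos hb] at h; simp at h; omega
    · rw [if_neg hb] at h; exact Nat.le_of_succ_le (ih (i + 1) _ _ p h)

theorem bFind_lt : ∀ (l : List Char) (i : Nat) (cnt : Int) (seen : Bool) (p : Nat),
    bFind l i cnt seen = some p → p < i + l.length := by
  intro l
  induction l with
  | nil => intro i cnt seen p h; simp [bFind] at h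
  | cons x rest ih =>
    intro i cnt seen p h
    simp only [bFind] at h
    by_cases hb : ((if x = '(' then true else seen) = true ∧ (if x = '(' then cnt + 1 else if x = ')' then cnt - 1 else cnt) = 0)
    · rw [if_pos hb] at h; simp at h; simp; omega
    · rw [if_neg hb] at h; have := ih (i + 1) _ _ p h; simp; omega

theorem loops_rel : ∀ (l : List Char) (i : Nat) (c cnt : Int) (seen : Bool),
    ¬(seen = true ∧ cnt = 0) →
    aLoop l i c cnt seen = (bFind l i cnt seen).map (fun p => (lastC (l.take (p - i)) i c, p)) := by
  intro l
  induction l with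
  | nil => intro i c cnt seen h; simp [aLoop, bFind]
  | cons x rest ih =>
    intro i c cnt seen h
    simp only [aLoop, bFind]
    by_cases hb : ((if x = '(' then true else seen) = true ∧ (if x = '(' then cnt + 1 else if x = ')' then cnt - 1 else cnt) = 0)
    · rw [if_pos hb, if_pos hb]
      have hx : ¬ x = ',' := by
        intro hx; subst hx; simp at hb; exact h hb
      simp [Option.map, hx, lastC]
    · rw [if_neg hb, if_neg hb]
      rw [ih (i + 1) _ _ _ hb]
      cases hres : bFind rest (i + 1) (if x = '(' then cnt + 1 else if x = ')' then cnt - 1 else cnt) (if x = '(' then true else seen) with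
      | none => simp
      | some p =>
        have hip : i + 1 ≤ p := bFind_ge _ _ _ _ _ hres
        simp only [Option.map]
        have hk : p - i = (p - (i + 1)) + 1 := by omega
        rw [hk]
        simp [List.take_succ_cons, lastC]

theorem bFind_none : ∀ (l : List Char) (i : Nat) (cnt : Int) (seen : Bool),
    bFind l i cnt seen = none →
    ∀ j < l.length,
      ¬((seen = true ∨ '(' ∈ l.take (j + 1)) ∧
        cnt + (((l.take (j + 1)).count '(' : Int) - ((l.take (j + 1)).count ')' : Int)) = 0) := by
  intro l
  induction l with
  | nil => intro i cnt seen _ j hj; simp at hj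
  | cons x rest ih =>
    intro i cnt seen hnone j hj
    simp only [bFind] at hnone
    by_cases hb : ((if x = '(' then true else seen) = true ∧ (if x = '(' then cnt + 1 else if x = ')' then cnt - 1 else cnt) = 0)
    · rw [if_pos hb] at hnone; simp at hnone
    · rw [if_neg hb] at hnone
      cases j with
      | zero =>
        rintro ⟨h1, h2⟩
        apply hb
        simp only [List.take_succ_cons, List.take_zero] at h1 h2
        simp [List.count_cons] at h2
        constructor
        · by_cases hx : x = '('
          · simp [hx]
          · rw [if_neg hx]
            rcases h1 with h1 | h1
            · exact h1
            · exfalso; exact hx (List.mem_singleton.mp h1).symm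
        · by_cases hx1 : x = '(' <;> by_cases hx2 : x = ')' <;>
            simp [hx1, hx2] at h2 ⊢ <;> omega
      | succ j' =>
        have hj' : j' < rest.length := by simp at hj; omega
        have := ih (i + 1) (if x = '(' then cnt + 1 else if x = ')' then cnt - 1 else cnt)
          (if x = '(' then true else seen) hnone j' hj'
        rintro ⟨h1, h2⟩
        apply this
        simp only [List.take_succ_cons] at h1 h2
        simp [List.count_cons] at h2 ⊢
        constructor
        · by_cases hx : x = '(' <;> simp [hx] at h1 ⊢ <;> tauto
        · by_cases hx1 : x = '(' <;> by_cases hx2 : x = ')' <;>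
            simp [hx1, hx2] at h2 ⊢ <;> omega

theorem lastC_append : ∀ (l : List Char) (x : Char) (i : Nat) (c : Int),
    lastC (l ++ [x]) i c = if x = ',' then (i : Int) + l.length else lastC l i c := by
  intro l
  induction l with
  | nil => intro x i c; simp [lastC]
  | cons y ys ih =>
    intro x i c
    simp only [List.cons_append, lastC, ih]
    split <;> simp <;> push_cast <;> ring

theorem rscan_eq : ∀ (l : List Char) (j : Nat), j < l.length →
    rscanComma l j = lastC (l.take (j + 1)) 0 0 := by
  intro l j
  induction j with
  | zero =>
    intro hj
    cases l with
    | nil => simp at hj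
    | cons x xs =>
      simp [rscanComma, lastC]
  | succ j' ih =>
    intro hj
    have hj' : j' < l.length := by omega
    have hx : ∃ x, l[j' + 1]? = some x := ⟨l[j' + 1], by simp [List.getElem?_eq_getElem hj]⟩
    obtain ⟨x, hget⟩ := hx
    have htake : l.take (j' + 2) = l.take (j' + 1) ++ [x] := by
      rw [List.take_add_one, hget]; rfl
    rw [htake, lastC_append]
    have hlen : (l.take (j' + 1)).length = j' + 1 := by
      simp [List.length_take]; omega
    simp only [rscanComma, hget, hlen]
    by_cases hc : x = ','
    · simp [hc]
    · have : ¬ l[j' + 1]? = some ',' := by rw [hget]; simp [hc]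
      simp [hc, ih hj']

-- ===== VERDICT (by name: the statement is the Claim_ definition above) =====
theorem comma_paren_spec : Claim_equal_comma_paren := by
  intro expr loc _ hpre
  unfold Spec_comma_paren
  set substr := PySem.List.slice expr.toList (some loc) none with hsub
  cases hb : bFind substr 0 0 false with
  | none =>
    exfalso
    obtain ⟨i, hi, hmem, hcnt⟩ := hpre
    exact (bFind_none substr 0 0 false hb i hi) ⟨Or.inr hmem, by rw [hcnt]; ring⟩
  | some p =>
    have hA := loops_rel substr 0 0 0 false (by simp)
    rw [hb] at hA
    simp only [Option.map] at hA
    have hplen : p < substr.length := by have := bFind_lt substr 0 0 false p hb; omega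
    simp only [comma_paren, comma_paren_alt, ← hsub, hA, hb]
    have hcomma : lastC (substr.take (p - 0)) 0 0 = if p = 0 then 0 else rscanComma substr (p - 1) := by
      cases p with
      | zero => simp [lastC]
      | succ p' =>
        have := rscan_eq substr p' (by omega)
        simp [this]
    rw [hcomma]
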